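-- pv_equiv track=rewrite | github.com/eshun4/Data-Structures-and-Algorithms-in-Python-2024 | Sliding Window/unique_best_seller_streak.py | best_seller_streak
-- ===== SOURCE A (Python) =====
-- def best_seller_streak(best_seller, k) -> bool:
--     # create variable for left pointer
--     left = 0
--     # create seen dictionary
--     seen = {}
--
--     # iterate through the array of books
--     for right in range(len(best_seller)):
--         right_book = best_seller[right]
--         seen[right_book] = seen.get(right_book, 0) + 1
--
--         if right - left + 1 > k:
--             left_book = best_seller[left]
--             seen[left_book] -= 1
--             if seen[left_book] == 0:
--                 del seen[left_book]
--             left += 1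
--
--         # if the books in seen are unique and if the window size is equal to k
--         if right - left + 1 == k and len(seen) == k:
--             return True
--     return False
-- ===== SOURCE B (Python) =====
-- def best_seller_streak(best_seller, k) -> bool:
--     # Per-window rescan: slice each candidate window and test uniqueness with a set,
--     # instead of maintaining a left pointer and an incremental count dictionary.
--     if k < 0 or not best_seller:
--         return False
--     n = len(best_seller)
--     for i in range(n - k + 1):
--         window = best_seller[i:i + k]
--         if len(set(window)) == k:
--             return True
--     return False
-- ===== Notes on version B (the rewrite author's own statement) =====
-- stated objective: simpler
-- what changed: Replaces the left-pointer/count-dictionary sliding window with a direct scan that slices each candidate window and checks len(set(window)) == k, guarded by an empty-list check.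
import Mathlib
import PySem

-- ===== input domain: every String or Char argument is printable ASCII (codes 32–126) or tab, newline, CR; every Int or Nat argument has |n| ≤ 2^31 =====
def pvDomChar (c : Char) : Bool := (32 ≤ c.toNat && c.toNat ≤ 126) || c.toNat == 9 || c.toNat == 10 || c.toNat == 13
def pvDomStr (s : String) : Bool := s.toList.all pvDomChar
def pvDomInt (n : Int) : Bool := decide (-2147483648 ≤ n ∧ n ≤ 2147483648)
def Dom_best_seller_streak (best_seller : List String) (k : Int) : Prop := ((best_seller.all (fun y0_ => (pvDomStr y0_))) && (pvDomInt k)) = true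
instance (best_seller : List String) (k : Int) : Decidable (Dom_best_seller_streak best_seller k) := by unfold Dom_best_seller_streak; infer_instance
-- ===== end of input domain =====

-- B replaces A's left-pointer/count-dictionary sliding window by a per-window slice-and-set
-- rescan (objective: simpler); return values proved equal on all inputs.

-- ===== PORT A =====
-- The body of A's 'if right - left + 1 > k:' block (shrink the window from the left), as a helper
-- returning the updated (left, seen). best_seller[left] is ported with pyGetD (exact here: A keeps
-- 0 ≤ left ≤ right < len); 'seen[left_book] -= 1' reads a key A guarantees present, ported as getD 0.
def bssStep (bs : List String) (k : Int) (right : Nat) (left : Int)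
    (seen1 : PySem.Dict String Int) : Int × PySem.Dict String Int :=
  if (right : Int) - left + 1 > k then
    let left_book := PySem.List.pyGetD bs left ""
    let seen2 := seen1.insert left_book (seen1.getD left_book 0 - 1)
    let seen3 := if seen2.getD left_book 0 == 0 then seen2.erase left_book else seen2
    (left + 1, seen3)
  else (left, seen1)

-- A's 'for right in range(len(best_seller))' loop as recursion on right.
def bssLoop (bs : List String) (k : Int) (n : Nat) (right : Nat)
    (left : Int) (seen : PySem.Dict String Int) : Bool :=
  if _h : right < n then
    let right_book := PySem.List.pyGetD bs (right : Int) ""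
    let seen1 := seen.insert right_book (seen.getD right_book 0 + 1)
    let st := bssStep bs k right left seen1
    if ((right : Int) - st.1 + 1 == k) && ((st.2.size : Int) == k) then true
    else bssLoop bs k n (right + 1) st.1 st.2
  else false
termination_by n - right

def best_seller_streak (best_seller : List String) (k : Int) : Bool :=
  bssLoop best_seller k best_seller.length 0 0 PySem.Dict.empty

-- ===== PORT B =====
def best_seller_streak_alt (best_seller : List String) (k : Int) : Bool :=
  if decide (k < 0) || best_seller.isEmpty then false
  else
    (PySem.List.pyRange 0 ((best_seller.length : Int) - k + 1) 1).any (fun i =>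
      let window := PySem.List.slice best_seller (some i) (some (i + k))
      ((PySem.Set.ofList window).length : Int) == k)

-- ===== PRECONDITION & SPEC =====
def Spec_best_seller_streak (best_seller : List String) (k : Int) (out : Bool) : Prop := out = best_seller_streak_alt best_seller k
instance (best_seller : List String) (k : Int) (out : Bool) : Decidable (Spec_best_seller_streak best_seller k out) := by unfold Spec_best_seller_streak; infer_instance

-- ===== CLAIM (what is proved, stated in full; the proofs are below) =====
def Claim_equal_best_seller_streak : Prop := ∀ (best_seller : List String) (k : Int), Dom_best_seller_streak best_seller k → Spec_best_seller_streak best_seller k (best_seller_streak best_seller k)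

-- ===== LEMMAS AND PROOFS =====

-- The window best_seller[l:r].
def pvWnd (bs : List String) (l r : Nat) : List String := (bs.drop l).take (r - l)

-- 'seen' is exactly the count dictionary of the window w.
def pvModels (seen : PySem.Dict String Int) (w : List String) : Prop :=
  seen.keys.Nodup ∧ (∀ s, s ∈ seen.keys ↔ s ∈ w) ∧ ∀ s, seen.getD s 0 = (w.count s : Int)

-- ---- Dict.erase facts (PySem ships no erase lemmas) ----
lemma pvFindFilter (l : List (String × Int)) (p q : String × Int → Bool) (h : ∀ x, p x → q x) :
    List.find? p (l.filter q) = List.find? p l := by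
  induction l with
  | nil => rfl
  | cons a t ih =>
    by_cases hq : q a
    · by_cases hp : p a <;> simp [hq, hp, ih]
    · have hp : ¬ p a := fun hpa => hq (h a hpa)
      simp [hq, hp, ih]

lemma pvGetD_erase_of_ne (d : PySem.Dict String Int) (b s : String) (v : Int) (h : s ≠ b) :
    (d.erase b).getD s v = d.getD s v := by
  simp only [PySem.Dict.getD, PySem.Dict.get?, PySem.Dict.erase]
  rw [pvFindFilter]
  rintro ⟨x1, x2⟩ hx
  simp_all

lemma pvGetD_erase_self (d : PySem.Dict String Int) (b : String) (v : Int) :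
    (d.erase b).getD b v = v := by
  simp only [PySem.Dict.getD, PySem.Dict.get?, PySem.Dict.erase]
  rw [List.find?_eq_none.mpr]
  · rfl
  · rintro ⟨x1, x2⟩ hx
    simp at hx ⊢
    exact hx.2

lemma pvMemKeys_erase (d : PySem.Dict String Int) (b s : String) :
    s ∈ (d.erase b).keys ↔ s ≠ b ∧ s ∈ d.keys := by
  simp only [PySem.Dict.keys, PySem.Dict.erase, List.mem_map, List.mem_filter]
  constructor
  · rintro ⟨⟨x1, x2⟩, ⟨hm, hne⟩, rfl⟩
    simp at hne
    exact ⟨hne, ⟨x1, x2⟩, hm, rfl⟩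
  · rintro ⟨hne, ⟨x1, x2⟩, hm, rfl⟩
    exact ⟨⟨x1, x2⟩, ⟨hm, by simpa using hne⟩, rfl⟩

lemma pvNodupKeys_erase (d : PySem.Dict String Int) (b : String) (h : d.keys.Nodup) :
    (d.erase b).keys.Nodup := by
  simp only [PySem.Dict.keys, PySem.Dict.erase] at *
  exact (List.Sublist.map _ List.filter_sublist).nodup h

-- ---- counting the distinct elements ----
lemma pvPermDedup (l w : List String) (hnd : l.Nodup) (hm : ∀ s, s ∈ l ↔ s ∈ w) :
    l.Perm w.dedup := by
  rw [List.perm_ext_iff_of_nodup hnd (List.nodup_dedup w)]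
  intro a; rw [hm, List.mem_dedup]

lemma pvSize_models (seen : PySem.Dict String Int) (w : List String) (h : pvModels seen w) :
    seen.size = w.dedup.length := by
  obtain ⟨hnd, hm, _⟩ := h
  have : seen.size = seen.keys.length := by
    simp [PySem.Dict.size, PySem.Dict.keys]
  rw [this, (pvPermDedup _ _ hnd hm).length_eq]

lemma pvDedupLen (w : List String) : w.dedup.length = w.length ↔ w.Nodup := by
  constructor
  · intro h
    rw [← List.dedup_eq_self]
    exact (List.dedup_sublist w).eq_of_length h
  · intro h; rw [List.dedup_eq_self.mpr h]

lemma pvSetLen (w : List String) : (PySem.Set.ofList w).length = w.dedup.length :=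
  (pvPermDedup _ _ (PySem.Set.nodup_ofList w) (fun s => PySem.Set.mem_ofList w s)).length_eq

-- ---- the invariant through A's two updates of 'seen' ----
lemma pvModels_insert (seen : PySem.Dict String Int) (w : List String) (b : String)
    (h : pvModels seen w) : pvModels (seen.insert b (seen.getD b 0 + 1)) (w ++ [b]) := by
  obtain ⟨hnd, hm, hc⟩ := h
  refine ⟨PySem.Dict.nodup_keys_insert _ _ _ hnd, ?_, ?_⟩
  · intro s
    rw [PySem.Dict.mem_keys_insert, hm]
    simp [or_comm]
  · intro s
    rw [PySem.Dict.getD_insert]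
    by_cases hs : s = b
    · subst hs
      rw [if_pos rfl, hc]
      simp
    · rw [if_neg hs, hc]
      have : b ≠ s := fun he => hs he.symm
      simp [List.count_append, this]

lemma pvModels_shrink (seen1 : PySem.Dict String Int) (a : String) (w' : List String)
    (h : pvModels seen1 (a :: w')) :
    pvModels (if (seen1.insert a (seen1.getD a 0 - 1)).getD a 0 == 0
              then (seen1.insert a (seen1.getD a 0 - 1)).erase a
              else seen1.insert a (seen1.getD a 0 - 1)) w' := by
  obtain ⟨hnd, hm, hc⟩ := h
  have hca : seen1.getD a 0 = ((a :: w').count a : Int) := hc a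
  have hgd : (seen1.insert a (seen1.getD a 0 - 1)).getD a 0 = (w'.count a : Int) := by
    rw [PySem.Dict.getD_insert_self, hca, List.count_cons_self]
    push_cast
    ring
  by_cases h0 : w'.count a = 0
  · have hnotmem : a ∉ w' := by
      rw [← List.count_eq_zero]; exact h0
    rw [if_pos (by rw [hgd, h0]; rfl)]
    refine ⟨pvNodupKeys_erase _ _ (PySem.Dict.nodup_keys_insert _ _ _ hnd), ?_, ?_⟩
    · intro s
      rw [pvMemKeys_erase, PySem.Dict.mem_keys_insert, hm]
      constructor
      · rintro ⟨hne, hmem⟩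
        rcases hmem with rfl | hmem
        · exact absurd rfl hne
        · simp at hmem
          rcases hmem with rfl | hmem
          · exact absurd rfl hne
          · exact hmem
      · intro hs
        exact ⟨fun he => hnotmem (he ▸ hs), Or.inr (by simp [hs])⟩
    · intro s
      by_cases hs : s = a
      · subst hs
        rw [pvGetD_erase_self, h0]
        rfl
      · rw [pvGetD_erase_of_ne _ _ _ _ hs, PySem.Dict.getD_insert_of_ne _ _ _ hs, hc]
        have h2 : ¬ a = s := fun he => hs he.symm
        simp [h2]
  · rw [if_neg (by rw [hgd]; simpa using fun he => h0 (by exact_mod_cast he))]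
    refine ⟨PySem.Dict.nodup_keys_insert _ _ _ hnd, ?_, ?_⟩
    · intro s
      rw [PySem.Dict.mem_keys_insert, hm]
      constructor
      · rintro (rfl | hmem)
        · exact List.count_pos_iff.mp (Nat.pos_of_ne_zero h0)
        · simp at hmem
          rcases hmem with rfl | hmem
          · exact List.count_pos_iff.mp (Nat.pos_of_ne_zero h0)
          · exact hmem
      · intro hs; exact Or.inr (by simp [hs])
    · intro s
      by_cases hs : s = a
      · subst hs; exact hgd
      · rw [PySem.Dict.getD_insert_of_ne _ _ _ hs, hc]
        have h2 : ¬ a = s := fun he => hs he.symm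
        simp [h2]

-- ---- window arithmetic ----
lemma pvWnd_len (bs : List String) (l r : Nat) (h2 : r ≤ bs.length) :
    (pvWnd bs l r).length = r - l := by
  simp [pvWnd]; omega

lemma pvWnd_snoc (bs : List String) (l r : Nat) (h1 : l ≤ r) (h2 : r < bs.length) :
    pvWnd bs l (r + 1) = pvWnd bs l r ++ [bs[r]] := by
  unfold pvWnd
  have hs : r + 1 - l = (r - l) + 1 := by omega
  rw [hs, List.take_add_one]
  congr 1
  rw [List.getElem?_drop]
  have : l + (r - l) = r := by omega
  rw [this, List.getElem?_eq_getElem h2]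
  rfl

lemma pvWnd_cons (bs : List String) (l r : Nat) (h1 : l < r) (h2 : l < bs.length) :
    pvWnd bs l r = bs[l] :: pvWnd bs (l + 1) r := by
  unfold pvWnd
  rw [List.drop_eq_getElem_cons h2]
  have hs : r - l = (r - (l + 1)) + 1 := by omega
  rw [hs, List.take_succ_cons]

-- ---- the shrink step, abstractly ----
lemma pvStep_shrink (bs : List String) (k : Int) (right l : Nat)
    (seen1 : PySem.Dict String Int) (w' : List String)
    (hcond : (right : Int) - (l : Int) + 1 > k) (hl : l < bs.length)
    (hm : pvModels seen1 (bs[l] :: w')) :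
    (bssStep bs k right ((l : Nat) : Int) seen1).1 = (l : Int) + 1 ∧
    pvModels (bssStep bs k right ((l : Nat) : Int) seen1).2 w' := by
  have hlb : PySem.List.pyGetD bs ((l : Nat) : Int) "" = bs[l] := by
    rw [PySem.List.pyGetD_natCast]; exact List.getD_eq_getElem bs "" hl
  unfold bssStep
  rw [if_pos hcond, hlb]
  exact ⟨rfl, pvModels_shrink seen1 bs[l] w' hm⟩

lemma pvStep_noshrink (bs : List String) (k : Int) (right : Nat) (left : Int)
    (seen1 : PySem.Dict String Int) (hcond : ¬((right : Int) - left + 1 > k)) :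
    bssStep bs k right left seen1 = (left, seen1) := by
  unfold bssStep
  rw [if_neg hcond]

lemma pvExSplit (r : Nat) (Q : Nat → Prop) :
    (∃ e, r < e ∧ Q e) ↔ Q (r + 1) ∨ ∃ e, r + 1 < e ∧ Q e := by
  constructor
  · rintro ⟨e, h1, h2⟩
    rcases Nat.lt_or_ge (r + 1) e with h | h
    · exact Or.inr ⟨e, h, h2⟩
    · have : e = r + 1 := by omega
      subst this
      exact Or.inl h2
  · rintro (h | ⟨e, h1, h2⟩)
    exacts [⟨r + 1, by omega, h⟩, ⟨e, by omega, h2⟩]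

-- ---- main loop characterisation for k ≥ 1 ----
lemma pvLoopIff (bs : List String) (kn : Nat) (hk : 0 < kn) :
    ∀ (d right : Nat) (seen : PySem.Dict String Int), bs.length - right = d →
    right ≤ bs.length → pvModels seen (pvWnd bs (right - min right kn) right) →
    (bssLoop bs (kn : Int) bs.length right ((right - min right kn : Nat) : Int) seen = true ↔
      ∃ e : Nat, right < e ∧ e ≤ bs.length ∧ kn ≤ e ∧ (pvWnd bs (e - kn) e).Nodup) := by
  intro d
  induction d with
  | zero =>
    intro right seen hd hle hmod
    have hnr : ¬ right < bs.length := by omega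
    rw [bssLoop, dif_neg hnr]
    constructor
    · intro h; cases h
    · rintro ⟨e, h1, h2, _⟩; omega
  | succ d ih =>
    intro right seen hd hle hmod
    have hlt : right < bs.length := by omega
    have hrb : PySem.List.pyGetD bs ((right : Nat) : Int) "" = bs[right] := by
      rw [PySem.List.pyGetD_natCast]
      exact List.getD_eq_getElem bs "" hlt
    rw [bssLoop, dif_pos hlt]
    simp only [hrb]
    set seen1 := seen.insert bs[right] (seen.getD bs[right] 0 + 1) with hseen1
    set l := right - min right kn with hldef
    have hm1 : pvModels seen1 (pvWnd bs l right ++ [bs[right]]) :=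
      pvModels_insert seen _ _ hmod
    have hsnoc : pvWnd bs l (right + 1) = pvWnd bs l right ++ [bs[right]] :=
      pvWnd_snoc bs l right (by omega) hlt
    set l' := (right + 1) - min (right + 1) kn with hl'def
    -- after the (possible) shrink: new left is l', and the dictionary models the new window
    have hstep : (bssStep bs (kn : Int) right ((l : Nat) : Int) seen1).1 = ((l' : Nat) : Int) ∧
        pvModels (bssStep bs (kn : Int) right ((l : Nat) : Int) seen1).2
          (pvWnd bs l' (right + 1)) := by
      by_cases hcase : kn ≤ right
      · have hll : l = right - kn := by omega
        have hl'l : l' = l + 1 := by omega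
        have hcond : (right : Int) - (l : Int) + 1 > (kn : Int) := by omega
        have hcons : pvWnd bs l (right + 1) = bs[l] :: pvWnd bs (l + 1) (right + 1) :=
          pvWnd_cons bs l (right + 1) (by omega) (by omega)
        have hm2 : pvModels seen1 (bs[l] :: pvWnd bs (l + 1) (right + 1)) := by
          rw [← hcons, hsnoc]; exact hm1
        obtain ⟨h1, h2⟩ := pvStep_shrink bs (kn : Int) right l seen1 _ hcond (by omega) hm2
        refine ⟨by rw [h1]; omega, ?_⟩
        rw [hl'l]
        exact h2
      · have hll : l = 0 := by omega
        have hl'l : l' = 0 := by omega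
        have hcond : ¬((right : Int) - (l : Int) + 1 > (kn : Int)) := by omega
        rw [pvStep_noshrink bs (kn : Int) right ((l : Nat) : Int) seen1 hcond]
        refine ⟨by omega, ?_⟩
        rw [hl'l, ← hll, hsnoc]
        exact hm1
    obtain ⟨hst1, hstm⟩ := hstep
    rw [hst1]
    have hWlen : (pvWnd bs l' (right + 1)).length = min (right + 1) kn := by
      rw [pvWnd_len bs l' (right + 1) (by omega)]; omega
    have hsize : (bssStep bs (kn : Int) right ((l : Nat) : Int) seen1).2.size =
        (pvWnd bs l' (right + 1)).dedup.length := pvSize_models _ _ hstm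
    by_cases hgood : kn ≤ right + 1 ∧ (pvWnd bs ((right + 1) - kn) (right + 1)).Nodup
    · obtain ⟨hg1, hg2⟩ := hgood
      have hl'eq : l' = (right + 1) - kn := by omega
      have hcond2 : (((bssStep bs (kn : Int) right ((l : Nat) : Int) seen1).2.size : Nat) : Int) =
          (kn : Int) := by
        rw [hsize, (pvDedupLen _).mpr (hl'eq ▸ hg2), hWlen]
        omega
      rw [if_pos (by
        simp only [Bool.and_eq_true, beq_iff_eq]
        exact ⟨by omega, hcond2⟩)]
      constructor
      · intro _
        exact ⟨right + 1, by omega, by omega, hg1, hg2⟩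
      · intro _; rfl
    · have hcnd : ¬((((right : Int) - ((l' : Nat) : Int) + 1 == (kn : Int)) &&
          ((((bssStep bs (kn : Int) right ((l : Nat) : Int) seen1).2.size : Nat) : Int) == (kn : Int))) = true) := by
        simp only [Bool.and_eq_true, beq_iff_eq]
        rintro ⟨hc1, hc2⟩
        have hk1 : kn ≤ right + 1 := by omega
        have hl'eq : l' = (right + 1) - kn := by omega
        have hlen : (pvWnd bs l' (right + 1)).length = kn := by omega
        have : (pvWnd bs l' (right + 1)).Nodup := by
          rw [← pvDedupLen, hlen, ← hsize]
          omega
        exact hgood ⟨hk1, hl'eq ▸ this⟩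
      rw [if_neg hcnd]
      have hcast : ((l' : Nat) : Int) + 1 = (((l' + 1 : Nat)) : Int) := by push_cast; ring
      have hl'next : l' + 1 = (right + 1) - min (right + 1) kn + 1 := by omega
      -- recurse: the new state satisfies the invariant at right + 1
      rw [ih (right + 1) _ (by omega) (by omega) hstm]
      rw [pvExSplit right (fun e => e ≤ bs.length ∧ kn ≤ e ∧ (pvWnd bs (e - kn) e).Nodup)]
      constructor
      · intro h; exact Or.inr h
      · rintro (⟨h1, h2, h3⟩ | h)
        · exact absurd ⟨h2, h3⟩ hgood
        · exact h

-- ---- loop characterisation for k ≤ 0 ----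
lemma pvLoopLe0 (bs : List String) (k : Int) (hk : k ≤ 0) :
    ∀ (d right : Nat), bs.length - right = d → right ≤ bs.length →
    bssLoop bs k bs.length right (right : Int) PySem.Dict.empty =
      decide (right < bs.length ∧ k = 0) := by
  intro d
  induction d with
  | zero =>
    intro right hd hle
    have : ¬ right < bs.length := by omega
    rw [bssLoop, dif_neg this]
    simp [this]
  | succ d ih =>
    intro right hd hle
    have hlt : right < bs.length := by omega
    rw [bssLoop, dif_pos hlt]
    have hcond : ((right : Int) - (right : Int) + 1 > k) := by omega
    simp only [bssStep, if_pos hcond]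
    set b := PySem.List.pyGetD bs (right : Int) "" with hb
    have e1 : (PySem.Dict.empty : PySem.Dict String Int).getD b 0 = 0 := by
      simp [PySem.Dict.getD_empty]
    have e2 : ((PySem.Dict.empty : PySem.Dict String Int).insert b (0 + 1)).getD b 0 = 1 :=
      PySem.Dict.getD_insert_self _ _ _ _
    have e3 : (((PySem.Dict.empty : PySem.Dict String Int).insert b (0 + 1)).insert b (1 - 1)).getD b 0 = 0 :=
      PySem.Dict.getD_insert_self _ _ _ _
    have e4 : (((PySem.Dict.empty : PySem.Dict String Int).insert b (0 + 1)).insert b (1 - 1)).erase b = PySem.Dict.empty := by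
      apply PySem.Dict.ext
      simp [PySem.Dict.insert, PySem.Dict.contains, PySem.Dict.erase, PySem.Dict.empty]
    simp only [e1, e2, e3, e4]
    have e6 : ((right : Int) - ((right : Int) + 1) + 1) = 0 := by ring
    have e7 : ((PySem.Dict.empty : PySem.Dict String Int).size : Int) = 0 := by
      simp [PySem.Dict.size_empty]
    simp only [beq_self_eq_true, if_true, e6, e7]
    by_cases hk0 : k = 0
    · subst hk0
      simp [hlt]
    · have hbk : ((0 : Int) == k) = false := by
        simp [BEq.beq]; omega
      simp only [hbk, Bool.false_and]
      have : ((right : Int) + 1) = ((right + 1 : Nat) : Int) := by push_cast; ring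
      rw [this, ih (right + 1) (by omega) (by omega)]
      simp [hk0]

-- ---- B characterised ----
lemma pvAltIff (bs : List String) (k : Int) (hk : 0 ≤ k) :
    (best_seller_streak_alt bs k = true ↔ bs ≠ [] ∧ ∃ i : Int, 0 ≤ i ∧
      i < (bs.length : Int) - k + 1 ∧
      ((PySem.Set.ofList (PySem.List.slice bs (some i) (some (i + k)))).length : Int) = k) := by
  unfold best_seller_streak_alt
  rw [show (decide (k < 0) || bs.isEmpty) = bs.isEmpty from by
    rw [decide_eq_false (by omega : ¬ k < 0), Bool.false_or]]
  by_cases hemp : bs.isEmpty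
  · rw [if_pos hemp]
    simp only [List.isEmpty_iff] at hemp
    simp [hemp]
  · rw [if_neg hemp]
    simp only [List.isEmpty_iff] at hemp
    rw [List.any_eq_true]
    constructor
    · rintro ⟨i, hmem, hp⟩
      rw [PySem.List.mem_pyRange_one] at hmem
      simp only [beq_iff_eq] at hp
      exact ⟨hemp, i, hmem.1, hmem.2, hp⟩
    · rintro ⟨_, i, h0, h1, h2⟩
      refine ⟨i, PySem.List.mem_pyRange_one.mpr ⟨h0, h1⟩, ?_⟩
      simp only [beq_iff_eq]
      exact h2

-- ===== VERDICT (by name: the statement is the Claim_ definition above) =====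
-- the existential forms of A (for k ≥ 1) and of B coincide
lemma pvBridge (bs : List String) (kn : Nat) (hk : 0 < kn) :
    (∃ e : Nat, 0 < e ∧ e ≤ bs.length ∧ kn ≤ e ∧ (pvWnd bs (e - kn) e).Nodup) ↔
    (bs ≠ [] ∧ ∃ i : Int, 0 ≤ i ∧ i < (bs.length : Int) - (kn : Int) + 1 ∧
      ((PySem.Set.ofList (PySem.List.slice bs (some i) (some (i + (kn : Int))))).length : Int) =
        (kn : Int)) := by
  constructor
  · rintro ⟨e, he0, hen, hke, hnd⟩
    have hlen0 : bs.length ≠ 0 := by omega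
    refine ⟨fun hn => hlen0 (by simp [hn]), ((e - kn : Nat) : Int), by omega, by omega, ?_⟩
    have hcast : ((e - kn : Nat) : Int) + (kn : Int) = ((e : Nat) : Int) := by omega
    rw [hcast, PySem.List.slice_natCast]
    have hw : List.take (e - (e - kn)) (List.drop (e - kn) bs) = pvWnd bs (e - kn) e := rfl
    rw [hw, pvSetLen, (pvDedupLen _).mpr hnd, pvWnd_len bs (e - kn) e hen]
    omega
  · rintro ⟨_, i, h0, h1, h2⟩
    have hij : i = ((i.toNat : Nat) : Int) := (Int.toNat_of_nonneg h0).symm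
    set j := i.toNat with hj
    rw [hij] at h1 h2
    rw [show ((j : Nat) : Int) + (kn : Int) = ((j + kn : Nat) : Int) by push_cast; ring] at h2
    rw [PySem.List.slice_natCast, show j + kn - j = kn from by omega] at h2
    set w0 := List.take kn (List.drop j bs) with hw0
    have hlen : (PySem.Set.ofList w0).length = kn := by exact_mod_cast h2
    rw [pvSetLen] at hlen
    have hsub : w0.dedup.length ≤ w0.length := (List.dedup_sublist _).length_le
    have hwlen : w0.length = min kn (bs.length - j) := by
      simp [hw0, List.length_take, List.length_drop]
    have hw0len : w0.length = kn := by omega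
    have hjk : j + kn ≤ bs.length := by omega
    have hnd : w0.Nodup := (pvDedupLen w0).mp (by omega)
    refine ⟨j + kn, by omega, hjk, by omega, ?_⟩
    have : pvWnd bs (j + kn - kn) (j + kn) = w0 := by
      unfold pvWnd
      rw [show j + kn - kn = j from by omega, show j + kn - j = kn from by omega]
    rw [this]
    exact hnd

lemma pvModelsEmpty : pvModels PySem.Dict.empty [] := by
  refine ⟨?_, ?_, ?_⟩
  · simp [PySem.Dict.empty, PySem.Dict.keys]
  · intro s; simp [PySem.Dict.empty, PySem.Dict.keys]
  · intro s; simp [PySem.Dict.getD_empty]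

theorem best_seller_streak_spec : Claim_equal_best_seller_streak := by
  intro bs k _hdom
  unfold Spec_best_seller_streak best_seller_streak
  rcases lt_trichotomy k 0 with hneg | hzero | hpos
  · -- k < 0: both sides are false
    have hA := pvLoopLe0 bs k (le_of_lt hneg) bs.length 0 rfl (by omega)
    rw [Nat.cast_zero] at hA
    rw [hA, decide_eq_false (by rintro ⟨-, h⟩; omega)]
    symm
    unfold best_seller_streak_alt
    rw [if_pos (by simp [hneg])]
  · -- k = 0
    subst hzero
    have hA := pvLoopLe0 bs 0 (le_refl 0) bs.length 0 rfl (by omega)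
    rw [Nat.cast_zero] at hA
    rw [hA]
    cases bs with
    | nil => simp [best_seller_streak_alt]
    | cons x xs =>
      rw [decide_eq_true (by constructor <;> simp)]
      symm
      rw [pvAltIff _ _ (le_refl 0)]
      refine ⟨by simp, 0, le_refl 0, by omega, ?_⟩
      rw [show (0 : Int) + 0 = ((0 : Nat) : Int) from by omega,
        show (0 : Int) = ((0 : Nat) : Int) from by omega, PySem.List.slice_natCast]
      simp
  · -- k ≥ 1
    have hkk : ((k.toNat : Nat) : Int) = k := Int.toNat_of_nonneg (le_of_lt hpos)
    set kn := k.toNat with hkn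
    have hk1 : 0 < kn := by omega
    have hmod : pvModels PySem.Dict.empty (pvWnd bs (0 - min 0 kn) 0) := by
      have : pvWnd bs (0 - min 0 kn) 0 = [] := by simp [pvWnd]
      rw [this]
      exact pvModelsEmpty
    have hA := pvLoopIff bs kn hk1 bs.length 0 PySem.Dict.empty rfl (by omega) hmod
    rw [show ((0 - min 0 kn : Nat) : Int) = (0 : Int) from by omega, hkk] at hA
    have hB := pvAltIff bs k (le_of_lt hpos)
    apply Bool.eq_iff_iff.mpr
    rw [hA, hB, ← hkk]
    exact pvBridge bs kn hk1
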